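-- pv_equiv track=rewrite | github.com/ACCtools/SKYPE | 24_cluster_weight.py | max_aligned_match_length
-- ===== SOURCE A (Python) =====
-- def max_aligned_match_length(
--     seq_a: list[tuple[tuple[str, str], int]],
--     seq_b: list[tuple[tuple[str, str], int]],
-- ) -> int:
--     """
--     Return the maximum total matched length after sliding two piecewise-constant
--     label sequences along one axis. A and B are lists of ((chrom, strand), length).
--     Only regions with exactly the same (chrom, strand) contribute to the score.
--
--     Algorithm:
--       1) Convert each sequence into absolute intervals [(start, end, label)].
--       2) Consider candidate shifts = {a_ep - b_ep | a_ep in endpoints(A), b_ep in endpoints(B)}.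
--          (The overlap configuration only changes when an endpoint meets another.)
--       3) For each shift, line-sweep over the two interval lists and accumulate
--          overlap length where labels are equal.
--       4) Return the maximum accumulated length across all shifts.
--
--     Time complexity:
--       Let n, m be #segments. Endpoints ~ (n+1), (m+1).
--       Candidates O((n+1)*(m+1)); each evaluation O(n+m). Works well for tens~hundreds of segments.
--     """
--     # --- build absolute intervals: [(start, end, label)] and endpoint lists ---
--     def build_intervals(seq):
--         intervals = []
--         endpoints = []
--         pos = 0
--         endpoints.append(pos)
--         for (label, length) in seq:
--             start = pos
--             end = pos + length
--             intervals.append((start, end, label))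
--             pos = end
--             endpoints.append(pos)
--         return intervals, endpoints
--
--     A, A_ep = build_intervals(seq_a)
--     B, B_ep = build_intervals(seq_b)
--
--     if not A or not B:
--         return 0
--
--     # --- generate candidate shifts (all endpoint differences) ---
--     # shift d means: compare A intervals with B intervals shifted by +d
--     candidates = set()
--     for a_e in A_ep:
--         for b_e in B_ep:
--             candidates.add(a_e - b_e)
--
--     # --- overlap length for a given shift ---
--     def match_length_for_shift(d: int) -> int:
--         i, j = 0, 0
--         total = 0
--         # Two-pointer sweep over A and shifted-B
--         while i < len(A) and j < len(B):
--             a_s, a_e, a_lab = A[i]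
--             b_s, b_e, b_lab = B[j]
--             b_s += d
--             b_e += d
--
--             # If no overlap, advance the one that ends earlier / starts later
--             if a_e <= b_s:
--                 i += 1
--                 continue
--             if b_e <= a_s:
--                 j += 1
--                 continue
--
--             # Overlapping segment
--             ov_s = a_s if a_s > b_s else b_s
--             ov_e = a_e if a_e < b_e else b_e
--             if ov_e > ov_s and a_lab == b_lab:
--                 total += (ov_e - ov_s)
--
--             # Advance the interval that ends first
--             if a_e <= b_e:
--                 i += 1
--             else:
--                 j += 1
--         return total
--
--     best = 0
--     # (Optional) small heuristic: iterate over sorted candidates for deterministic behavior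
--     for d in sorted(candidates):
--         val = match_length_for_shift(d)
--         if val > best:
--             best = val
--
--     return best
-- ===== SOURCE B (Python) =====
-- def max_aligned_match_length(
--     seq_a: list[tuple[tuple[str, str], int]],
--     seq_b: list[tuple[tuple[str, str], int]],
-- ) -> int:
--     # Same result, different decomposition: prefix-sum endpoint lists zipped into
--     # intervals, shifts taken as a set comprehension fed straight to max (no
--     # sorting, no best-accumulator), and a stack-based sweep consuming reversed
--     # interval lists that adds the clamped equal-label overlap before popping.
--     def intervals(seq):
--         ends = [0]
--         for _, ln in seq:
--             ends.append(ends[-1] + ln)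
--         ivs = [(s, e, lab) for s, e, (lab, _) in zip(ends, ends[1:], seq)]
--         return ivs, ends
--
--     ivs_a, ends_a = intervals(seq_a)
--     ivs_b, ends_b = intervals(seq_b)
--     rev_a = ivs_a[::-1]
--     rev_b = ivs_b[::-1]
--
--     def sweep(d):
--         sx = list(rev_a)
--         sy = list(rev_b)
--         total = 0
--         while sx and sy:
--             s1, e1, l1 = sx[-1]
--             s2, e2, l2 = sy[-1]
--             s2 += d
--             e2 += d
--             if l1 == l2:
--                 ov = min(e1, e2) - max(s1, s2)
--                 if ov > 0:
--                     total += ov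
--             if e1 <= s2 or (s1 < e2 and e1 <= e2):
--                 sx.pop()
--             else:
--                 sy.pop()
--         return total
--
--     return max((sweep(d) for d in {x - y for x in ends_a for y in ends_b}), default=0)
-- ===== Notes on version B (the rewrite author's own statement) =====
-- stated objective: alternative
-- what changed: B builds intervals by zipping a prefix-sum endpoint list, feeds the shift set straight to max (no sorting, no strict-improvement accumulator), and replaces the index-based three-branch two-pointer sweep by a stack sweep over reversed interval lists that adds the clamped equal-label overlap unconditionally before popping one side.
import Mathlib
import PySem

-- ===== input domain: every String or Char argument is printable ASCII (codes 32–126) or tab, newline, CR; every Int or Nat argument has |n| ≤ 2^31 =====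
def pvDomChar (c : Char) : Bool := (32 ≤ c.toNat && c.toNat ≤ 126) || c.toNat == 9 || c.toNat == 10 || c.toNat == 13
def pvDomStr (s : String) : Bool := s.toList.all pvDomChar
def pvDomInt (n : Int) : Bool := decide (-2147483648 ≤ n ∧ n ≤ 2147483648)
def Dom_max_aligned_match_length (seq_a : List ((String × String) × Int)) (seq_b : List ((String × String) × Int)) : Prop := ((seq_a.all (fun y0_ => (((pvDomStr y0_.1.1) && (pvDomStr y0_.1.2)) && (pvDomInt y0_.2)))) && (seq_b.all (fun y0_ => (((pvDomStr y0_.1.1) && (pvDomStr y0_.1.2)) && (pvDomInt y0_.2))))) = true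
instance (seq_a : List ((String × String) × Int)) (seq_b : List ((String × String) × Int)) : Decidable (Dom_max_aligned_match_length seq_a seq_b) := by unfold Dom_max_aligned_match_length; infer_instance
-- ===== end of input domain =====

-- B removes the candidate set and the sort (a plain max over all endpoint differences),
-- builds intervals from a prefix-sum endpoint list, and sweeps suffix lists adding the
-- clamped equal-label overlap unconditionally; same result and cost class (objective: alternative).

-- ===== PORT A =====
-- build_intervals: loop appending (start, end, label) and endpoints, tracking pos
def pvBuildLoopA : List ((String × String) × Int) → List (Int × Int × (String × String)) → List Int → Int → (List (Int × Int × (String × String)) × List Int)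
  | [], ivs, eps, _ => (ivs, eps)
  | (lab, len) :: rest, ivs, eps, pos =>
      pvBuildLoopA rest (ivs ++ [(pos, pos + len, lab)]) (eps ++ [pos + len]) (pos + len)

def pvBuildIntervalsA (seq : List ((String × String) × Int)) : List (Int × Int × (String × String)) × List Int :=
  pvBuildLoopA seq [] [0] 0

-- match_length_for_shift: while i < len(A) and j < len(B) two-pointer sweep
def pvSweepLoopA (A B : List (Int × Int × (String × String))) (d : Int) (i j : Nat) (total : Int) : Int :=
  if h : i < A.length ∧ j < B.length then
    let a := A[i]'h.1
    let b := B[j]'h.2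
    let s1 := a.1; let e1 := a.2.1; let l1 := a.2.2
    let s2 := b.1 + d; let e2 := b.2.1 + d; let l2 := b.2.2
    if e1 ≤ s2 then pvSweepLoopA A B d (i + 1) j total
    else if e2 ≤ s1 then pvSweepLoopA A B d i (j + 1) total
    else
      let ovs := if s1 > s2 then s1 else s2
      let ove := if e1 < e2 then e1 else e2
      let total' := if ove > ovs ∧ l1 = l2 then total + (ove - ovs) else total
      if e1 ≤ e2 then pvSweepLoopA A B d (i + 1) j total'
      else pvSweepLoopA A B d i (j + 1) total'
  else total
termination_by A.length - i + (B.length - j)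
decreasing_by all_goals omega

def max_aligned_match_length (seq_a : List ((String × String) × Int)) (seq_b : List ((String × String) × Int)) : Int :=
  let pa := pvBuildIntervalsA seq_a
  let pb := pvBuildIntervalsA seq_b
  if pa.1 = [] ∨ pb.1 = [] then 0
  else
    let cands := pa.2.foldl (fun s x => pb.2.foldl (fun s y => PySem.Set.add s (x - y)) s) PySem.Set.empty
    (PySem.List.sorted cands (fun x => x) false).foldl
      (fun best d =>
        let val := pvSweepLoopA pa.1 pb.1 d 0 0 0
        if val > best then val else best) 0

-- ===== PORT B =====
-- ends: prefix sums of the lengths, starting at 0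
def pvEndsB (seq : List ((String × String) × Int)) : List Int :=
  seq.foldl (fun es q => es ++ [es.getLast! + q.2]) [0]

-- intervals: zip(ends, ends[1:], seq)
def pvIntervalsB (seq : List ((String × String) × Int)) : List (Int × Int × (String × String)) :=
  ((pvEndsB seq).zip (((pvEndsB seq).tail).zip seq)).map (fun p => (p.1, p.2.1, p.2.2.1))

-- sweep: while sx and sy, peek sx[-1]/sy[-1] (getLast with the loop guard's proof),
-- add the clamped equal-label overlap, pop one stack
def pvSweepStk (d : Int) (sx sy : List (Int × Int × (String × String))) (total : Int) : Int :=
  if h : sx ≠ [] ∧ sy ≠ [] then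
    let x := sx.getLast h.1
    let y := sy.getLast h.2
    let s1 := x.1; let e1 := x.2.1; let l1 := x.2.2
    let s2 := y.1 + d; let e2 := y.2.1 + d; let l2 := y.2.2
    let total' :=
      if l1 = l2 then
        let ov := min e1 e2 - max s1 s2
        if ov > 0 then total + ov else total
      else total
    if e1 ≤ s2 ∨ (s1 < e2 ∧ e1 ≤ e2) then pvSweepStk d sx.dropLast sy total'
    else pvSweepStk d sx sy.dropLast total'
  else total
termination_by sx.length + sy.length
decreasing_by
  · have h1 : 0 < sx.length := List.length_pos_iff.mpr h.1
    simp [List.length_dropLast]; omega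
  · have h2 : 0 < sy.length := List.length_pos_iff.mpr h.2
    simp [List.length_dropLast]; omega

-- ivs[::-1] is full-slice reversal (exact: List.reverse); list(rev) copies, a no-op here
def max_aligned_match_length_alt (seq_a : List ((String × String) × Int)) (seq_b : List ((String × String) × Int)) : Int :=
  let rev_a := (pvIntervalsB seq_a).reverse
  let rev_b := (pvIntervalsB seq_b).reverse
  let shifts := PySem.Set.ofList ((pvEndsB seq_a).flatMap (fun x => (pvEndsB seq_b).map (fun y => x - y)))
  match shifts.map (fun d => pvSweepStk d rev_a rev_b 0) with
  | [] => 0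
  | v :: vs => vs.foldl max v

-- ===== PRECONDITION & SPEC =====
def Spec_max_aligned_match_length (seq_a : List ((String × String) × Int)) (seq_b : List ((String × String) × Int)) (out : Int) : Prop := out = max_aligned_match_length_alt seq_a seq_b
instance (seq_a : List ((String × String) × Int)) (seq_b : List ((String × String) × Int)) (out : Int) : Decidable (Spec_max_aligned_match_length seq_a seq_b out) := by unfold Spec_max_aligned_match_length; infer_instance

-- ===== CLAIM (what is proved, stated in full; the proofs are below) =====
def Claim_equal_max_aligned_match_length : Prop := ∀ (seq_a : List ((String × String) × Int)) (seq_b : List ((String × String) × Int)), Dom_max_aligned_match_length seq_a seq_b → Spec_max_aligned_match_length seq_a seq_b (max_aligned_match_length seq_a seq_b)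

-- ===== LEMMAS AND PROOFS =====

-- proof-side reference: the same sweep as recursion on head/tail suffix lists
def pvRefSweep (d : Int) : List (Int × Int × (String × String)) → List (Int × Int × (String × String)) → Int → Int
  | x :: xs, y :: ys, total =>
      let s1 := x.1; let e1 := x.2.1; let l1 := x.2.2
      let s2 := y.1 + d; let e2 := y.2.1 + d; let l2 := y.2.2
      let total' :=
        if l1 = l2 then
          let ov := min e1 e2 - max s1 s2
          if ov > 0 then total + ov else total
        else total
      if e1 ≤ s2 ∨ (s1 < e2 ∧ e1 ≤ e2) then pvRefSweep d xs (y :: ys) total'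
      else pvRefSweep d (x :: xs) ys total'
  | _, _, total => total
termination_by xs ys _ => xs.length + ys.length


-- reference shapes for the interval/endpoint constructions
def pvEnds0 (pos : Int) : List ((String × String) × Int) → List Int
  | [] => [pos]
  | q :: rest => pos :: pvEnds0 (pos + q.2) rest

def pvIvs0 (pos : Int) : List ((String × String) × Int) → List (Int × Int × (String × String))
  | [] => []
  | q :: rest => (pos, pos + q.2, q.1) :: pvIvs0 (pos + q.2) rest

theorem pvEnds0_head (pos : Int) (seq : List ((String × String) × Int)) :
    pvEnds0 pos seq = pos :: (pvEnds0 pos seq).tail := by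
  cases seq <;> simp [pvEnds0]

theorem pvBuildLoopA_eq (seq : List ((String × String) × Int)) :
    ∀ (ivs : List (Int × Int × (String × String))) (eps : List Int) (pos : Int),
    pvBuildLoopA seq ivs eps pos = (ivs ++ pvIvs0 pos seq, eps ++ (pvEnds0 pos seq).tail) := by
  induction seq with
  | nil => intro ivs eps pos; simp [pvBuildLoopA, pvIvs0, pvEnds0]
  | cons q rest ih =>
      intro ivs eps pos
      obtain ⟨lab, len⟩ := q
      rw [pvBuildLoopA, ih]
      refine Prod.ext ?_ ?_
      · simp [pvIvs0]
      · simp only [pvEnds0]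
        rw [pvEnds0_head (pos + len) rest]
        simp

theorem pvBuildIntervalsA_eq (seq : List ((String × String) × Int)) :
    pvBuildIntervalsA seq = (pvIvs0 0 seq, pvEnds0 0 seq) := by
  rw [pvBuildIntervalsA, pvBuildLoopA_eq]
  refine Prod.ext (by simp) ?_
  rw [pvEnds0_head 0 seq]
  simp

theorem pvGetLastBang_concat (l : List Int) (x : Int) : (l ++ [x]).getLast! = x := by
  induction l with
  | nil => rfl
  | cons a t ih =>
      cases t with
      | nil => rfl
      | cons b t' => simpa using ih

theorem pvEndsB_loop_eq (seq : List ((String × String) × Int)) :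
    ∀ (es' : List Int) (pos : Int),
    seq.foldl (fun es q => es ++ [es.getLast! + q.2]) (es' ++ [pos]) = es' ++ pvEnds0 pos seq := by
  induction seq with
  | nil => intro es' pos; simp [pvEnds0]
  | cons q rest ih =>
      intro es' pos
      rw [List.foldl_cons, pvGetLastBang_concat]
      have : es' ++ [pos] ++ [pos + q.2] = (es' ++ [pos]) ++ [pos + q.2] := by simp
      rw [this, ih (es' ++ [pos]) (pos + q.2)]
      simp [pvEnds0]

theorem pvEndsB_eq (seq : List ((String × String) × Int)) : pvEndsB seq = pvEnds0 0 seq := by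
  have := pvEndsB_loop_eq seq [] 0
  simpa [pvEndsB] using this

theorem pvIntervalsB_zip (seq : List ((String × String) × Int)) :
    ∀ pos : Int,
    ((pvEnds0 pos seq).zip (((pvEnds0 pos seq).tail).zip seq)).map (fun p => (p.1, p.2.1, p.2.2.1))
      = pvIvs0 pos seq := by
  induction seq with
  | nil => intro pos; simp [pvEnds0, pvIvs0]
  | cons q rest ih =>
      intro pos
      simp only [pvEnds0, pvIvs0, List.tail_cons]
      rw [pvEnds0_head (pos + q.2) rest]
      simp only [List.zip_cons_cons, List.map_cons]
      rw [← pvEnds0_head (pos + q.2) rest]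
      exact congrArg _ (ih (pos + q.2))

theorem pvIntervalsB_eq (seq : List ((String × String) × Int)) :
    pvIntervalsB seq = pvIvs0 0 seq := by
  rw [pvIntervalsB, pvEndsB_eq, pvIntervalsB_zip]

-- sweep facts
theorem pvRefSweep_nil_left (d : Int) (ys : List (Int × Int × (String × String))) (t : Int) :
    pvRefSweep d [] ys t = t := by
  cases ys <;> rw [pvRefSweep.eq_def]

theorem pvRefSweep_nil_right (d : Int) (xs : List (Int × Int × (String × String))) (t : Int) :
    pvRefSweep d xs [] t = t := by
  cases xs <;> rw [pvRefSweep.eq_def]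

theorem pvRefSweep_cons (d : Int) (s1 e1 : Int) (l1 : String × String) (s2 e2 : Int)
    (l2 : String × String) (xs ys : List (Int × Int × (String × String))) (t : Int) :
    pvRefSweep d ((s1, e1, l1) :: xs) ((s2, e2, l2) :: ys) t =
      if e1 ≤ s2 + d ∨ (s1 < e2 + d ∧ e1 ≤ e2 + d) then
        pvRefSweep d xs ((s2, e2, l2) :: ys)
          (if l1 = l2 then
            (if min e1 (e2 + d) - max s1 (s2 + d) > 0 then t + (min e1 (e2 + d) - max s1 (s2 + d)) else t)
          else t)
      else
        pvRefSweep d ((s1, e1, l1) :: xs) ys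
          (if l1 = l2 then
            (if min e1 (e2 + d) - max s1 (s2 + d) > 0 then t + (min e1 (e2 + d) - max s1 (s2 + d)) else t)
          else t) := by
  rw [pvRefSweep.eq_def]

theorem pvSweepLoopA_step (A B : List (Int × Int × (String × String))) (d : Int) (i j : Nat)
    (t : Int) (h : i < A.length ∧ j < B.length) (s1 e1 : Int) (l1 : String × String)
    (s2 e2 : Int) (l2 : String × String)
    (hp : A[i]'h.1 = (s1, e1, l1)) (hq : B[j]'h.2 = (s2, e2, l2)) :
    pvSweepLoopA A B d i j t =
      if e1 ≤ s2 + d then pvSweepLoopA A B d (i + 1) j t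
      else if e2 + d ≤ s1 then pvSweepLoopA A B d i (j + 1) t
      else if e1 ≤ e2 + d then
        pvSweepLoopA A B d (i + 1) j
          (if (if e1 < e2 + d then e1 else e2 + d) > (if s1 > s2 + d then s1 else s2 + d) ∧ l1 = l2
            then t + ((if e1 < e2 + d then e1 else e2 + d) - (if s1 > s2 + d then s1 else s2 + d))
            else t)
      else
        pvSweepLoopA A B d i (j + 1)
          (if (if e1 < e2 + d then e1 else e2 + d) > (if s1 > s2 + d then s1 else s2 + d) ∧ l1 = l2
            then t + ((if e1 < e2 + d then e1 else e2 + d) - (if s1 > s2 + d then s1 else s2 + d))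
            else t) := by
  rw [pvSweepLoopA, dif_pos h, hp, hq]

theorem pvRefSweep_mono (d : Int) (xs ys : List (Int × Int × (String × String))) (t : Int) :
    t ≤ pvRefSweep d xs ys t := by
  induction hn : xs.length + ys.length using Nat.strong_induction_on generalizing xs ys t with
  | _ n ih =>
    rcases xs with _ | ⟨⟨s1, e1, l1⟩, xs⟩
    · rw [pvRefSweep_nil_left]
    · rcases ys with _ | ⟨⟨s2, e2, l2⟩, ys⟩
      · rw [pvRefSweep_nil_right]
      · rw [pvRefSweep_cons]
        simp only [List.length_cons] at hn
        split
        · refine le_trans (show t ≤ _ by (repeat' split) <;> omega)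
            (ih (xs.length + (ys.length + 1)) (by omega) _ _ _ (by simp))
        · refine le_trans (show t ≤ _ by (repeat' split) <;> omega)
            (ih (xs.length + 1 + ys.length) (by omega) _ _ _ (by simp))

theorem pvTotal_eq (s1 e1 s2 e2 t : Int) (l1 l2 : String × String) :
    (if (if e1 < e2 then e1 else e2) > (if s1 > s2 then s1 else s2) ∧ l1 = l2
      then t + ((if e1 < e2 then e1 else e2) - (if s1 > s2 then s1 else s2)) else t)
    = (if l1 = l2 then (if min e1 e2 - max s1 s2 > 0 then t + (min e1 e2 - max s1 s2) else t) else t) := by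
  by_cases hl : l1 = l2
  · simp only [hl, and_true, if_true]
    (repeat' split) <;> omega
  · simp [hl]

theorem pvTotalSkip (s1 e1 s2 e2 t : Int) (l1 l2 : String × String) (h : e1 ≤ s2 ∨ e2 ≤ s1) :
    (if l1 = l2 then (if min e1 e2 - max s1 s2 > 0 then t + (min e1 e2 - max s1 s2) else t) else t) = t := by
  (repeat' split) <;> omega

theorem pvSweepA_eq_B (A B : List (Int × Int × (String × String))) (d : Int) :
    ∀ (i j : Nat) (t : Int), pvSweepLoopA A B d i j t = pvRefSweep d (A.drop i) (B.drop j) t := by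
  intro i j t
  induction hn : A.length - i + (B.length - j) using Nat.strong_induction_on generalizing i j t with
  | _ n ih =>
  subst hn
  by_cases h : i < A.length ∧ j < B.length
  · obtain ⟨⟨s1, e1, l1⟩, hp⟩ : ∃ v, A[i]'h.1 = v := ⟨_, rfl⟩
    obtain ⟨⟨s2, e2, l2⟩, hq⟩ : ∃ v, B[j]'h.2 = v := ⟨_, rfl⟩
    have hA : A.drop i = (s1, e1, l1) :: A.drop (i + 1) := by
      rw [List.drop_eq_getElem_cons h.1, hp]
    have hB : B.drop j = (s2, e2, l2) :: B.drop (j + 1) := by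
      rw [List.drop_eq_getElem_cons h.2, hq]
    have ih1 : ∀ t' : Int, pvSweepLoopA A B d (i + 1) j t' = pvRefSweep d (A.drop (i + 1)) (B.drop j) t' :=
      fun t' => ih (A.length - (i + 1) + (B.length - j)) (by omega) (i + 1) j t' rfl
    have ih2 : ∀ t' : Int, pvSweepLoopA A B d i (j + 1) t' = pvRefSweep d (A.drop i) (B.drop (j + 1)) t' :=
      fun t' => ih (A.length - i + (B.length - (j + 1))) (by omega) i (j + 1) t' rfl
    rw [pvSweepLoopA_step A B d i j t h s1 e1 l1 s2 e2 l2 hp hq, hA, hB, pvRefSweep_cons]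
    by_cases h1 : e1 ≤ s2 + d
    · rw [if_pos h1, if_pos (Or.inl h1), pvTotalSkip _ _ _ _ _ _ _ (Or.inl h1), ← hB]
      exact ih1 t
    · by_cases h2 : e2 + d ≤ s1
      · rw [if_neg h1, if_pos h2,
          if_neg (show ¬(e1 ≤ s2 + d ∨ (s1 < e2 + d ∧ e1 ≤ e2 + d)) by rintro (hc | ⟨hc, _⟩) <;> omega),
          pvTotalSkip _ _ _ _ _ _ _ (Or.inr h2), ← hA]
        exact ih2 t
      · rw [if_neg h1, if_neg h2, pvTotal_eq]
        by_cases h3 : e1 ≤ e2 + d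
        · rw [if_pos h3, if_pos (Or.inr ⟨by omega, h3⟩), ← hB]
          exact ih1 _
        · rw [if_neg h3,
            if_neg (show ¬(e1 ≤ s2 + d ∨ (s1 < e2 + d ∧ e1 ≤ e2 + d)) by rintro (hc | ⟨_, hc⟩) <;> omega),
            ← hA]
          exact ih2 _
  · rw [pvSweepLoopA, dif_neg h]
    rcases Nat.lt_or_ge i A.length with hi | hi
    · have hj : B.length ≤ j := by omega
      rw [List.drop_eq_nil_of_le hj, pvRefSweep_nil_right]
    · rw [List.drop_eq_nil_of_le hi, pvRefSweep_nil_left]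

theorem pvSweepA_top (A B : List (Int × Int × (String × String))) (d : Int) :
    pvSweepLoopA A B d 0 0 0 = pvRefSweep d A B 0 := by
  rw [pvSweepA_eq_B A B d 0 0 0, List.drop_zero, List.drop_zero]

theorem pvSweepStk_nil_left (d : Int) (ys : List (Int × Int × (String × String))) (t : Int) :
    pvSweepStk d [] ys t = t := by
  rw [pvSweepStk, dif_neg (by simp)]

theorem pvSweepStk_nil_right (d : Int) (xs : List (Int × Int × (String × String))) (t : Int) :
    pvSweepStk d xs [] t = t := by
  rw [pvSweepStk, dif_neg (by simp)]

theorem pvSweepStk_step (d : Int) (s1 e1 : Int) (l1 : String × String) (s2 e2 : Int)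
    (l2 : String × String) (xs ys : List (Int × Int × (String × String))) (t : Int) :
    pvSweepStk d (xs ++ [(s1, e1, l1)]) (ys ++ [(s2, e2, l2)]) t =
      if e1 ≤ s2 + d ∨ (s1 < e2 + d ∧ e1 ≤ e2 + d) then
        pvSweepStk d xs (ys ++ [(s2, e2, l2)])
          (if l1 = l2 then
            (if min e1 (e2 + d) - max s1 (s2 + d) > 0 then t + (min e1 (e2 + d) - max s1 (s2 + d)) else t)
          else t)
      else
        pvSweepStk d (xs ++ [(s1, e1, l1)]) ys
          (if l1 = l2 then
            (if min e1 (e2 + d) - max s1 (s2 + d) > 0 then t + (min e1 (e2 + d) - max s1 (s2 + d)) else t)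
          else t) := by
  rw [pvSweepStk, dif_pos ⟨by simp, by simp⟩]
  simp only [List.getLast_concat, List.dropLast_concat]

theorem pvStk_eq_ref (d : Int) :
    ∀ (xs ys : List (Int × Int × (String × String))) (t : Int),
    pvSweepStk d xs.reverse ys.reverse t = pvRefSweep d xs ys t := by
  intro xs ys t
  induction hn : xs.length + ys.length using Nat.strong_induction_on generalizing xs ys t with
  | _ n ih =>
  subst hn
  rcases xs with _ | ⟨⟨s1, e1, l1⟩, xs⟩
  · simp only [List.reverse_nil]
    rw [pvSweepStk_nil_left, pvRefSweep_nil_left]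
  · rcases ys with _ | ⟨⟨s2, e2, l2⟩, ys⟩
    · simp only [List.reverse_nil]
      rw [pvSweepStk_nil_right, pvRefSweep_nil_right]
    · rw [List.reverse_cons, List.reverse_cons, pvSweepStk_step, pvRefSweep_cons]
      split
      · rw [← List.reverse_cons]
        exact ih (xs.length + ((s2, e2, l2) :: ys).length) (by simp) xs ((s2, e2, l2) :: ys) _ rfl
      · rw [← List.reverse_cons]
        exact ih (((s1, e1, l1) :: xs).length + ys.length) (by simp) ((s1, e1, l1) :: xs) ys _ rfl

-- max-fold facts, value function g
theorem pvFoldIf_eq_foldMax (g : Int → Int) (l : List Int) :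
    ∀ b : Int, l.foldl (fun best d => if g d > best then g d else best) b
      = l.foldl (fun best d => max best (g d)) b := by
  induction l with
  | nil => intro b; rfl
  | cons d rest ih =>
      intro b
      simp only [List.foldl_cons]
      rw [ih]
      congr 1
      split <;> omega

theorem pvFoldMax_le_init (g : Int → Int) (l : List Int) :
    ∀ b : Int, b ≤ l.foldl (fun best d => max best (g d)) b := by
  induction l with
  | nil => intro b; exact le_refl b
  | cons d rest ih =>
      intro b
      exact le_trans (le_max_left b (g d)) (ih _)

theorem pvFoldMax_le_mem (g : Int → Int) (l : List Int) :
    ∀ b : Int, ∀ d ∈ l, g d ≤ l.foldl (fun best d => max best (g d)) b := by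
  induction l with
  | nil => intro b d hd; simp at hd
  | cons d0 rest ih =>
      intro b d hd
      simp only [List.foldl_cons]
      rcases List.mem_cons.mp hd with h | h
      · subst h; exact le_trans (le_max_right b (g d)) (pvFoldMax_le_init g rest _)
      · exact ih _ d h

theorem pvFoldMax_cases (g : Int → Int) (l : List Int) :
    ∀ b : Int, l.foldl (fun best d => max best (g d)) b = b ∨
      ∃ d ∈ l, l.foldl (fun best d => max best (g d)) b = g d := by
  induction l with
  | nil => intro b; exact Or.inl rfl
  | cons d0 rest ih =>
      intro b
      simp only [List.foldl_cons]
      rcases ih (max b (g d0)) with h | ⟨d, hd, h⟩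
      · rcases max_cases b (g d0) with ⟨he, _⟩ | ⟨he, _⟩
        · exact Or.inl (h.trans he)
        · exact Or.inr ⟨d0, List.mem_cons_self .., h.trans he⟩
      · exact Or.inr ⟨d, List.mem_cons_of_mem _ hd, h⟩

theorem pvFoldMax_mem_congr (g : Int → Int) (l₁ l₂ : List Int) (b : Int)
    (h : ∀ x, x ∈ l₁ ↔ x ∈ l₂) :
    l₁.foldl (fun best d => max best (g d)) b = l₂.foldl (fun best d => max best (g d)) b := by
  apply le_antisymm
  · rcases pvFoldMax_cases g l₁ b with h1 | ⟨d, hd, h1⟩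
    · rw [h1]; exact pvFoldMax_le_init g l₂ b
    · rw [h1]; exact pvFoldMax_le_mem g l₂ b d ((h d).mp hd)
  · rcases pvFoldMax_cases g l₂ b with h2 | ⟨d, hd, h2⟩
    · rw [h2]; exact pvFoldMax_le_init g l₁ b
    · rw [h2]; exact pvFoldMax_le_mem g l₁ b d ((h d).mpr hd)

-- candidate-set membership
theorem pvMem_foldl_add (f : Int → Int) (l : List Int) :
    ∀ (s : PySem.Set Int) (x : Int),
    (x ∈ l.foldl (fun s y => PySem.Set.add s (f y)) s) ↔ x ∈ s ∨ ∃ y ∈ l, x = f y := by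
  induction l with
  | nil => intro s x; simp
  | cons y0 rest ih =>
      intro s x
      simp only [List.foldl_cons]
      rw [ih]
      rw [PySem.Set.mem_add]
      constructor
      · rintro (⟨hs | he⟩ | ⟨y, hy, hx⟩)
        · exact Or.inl hs
        · exact Or.inr ⟨y0, List.mem_cons_self .., he⟩
        · exact Or.inr ⟨y, List.mem_cons_of_mem _ hy, hx⟩
      · rintro (hs | ⟨y, hy, hx⟩)
        · exact Or.inl (Or.inl hs)
        · rcases List.mem_cons.mp hy with h | h
          · exact Or.inl (Or.inr (h ▸ hx))
          · exact Or.inr ⟨y, h, hx⟩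

theorem pvMem_cands_gen (eb : List Int) (ea : List Int) :
    ∀ (s : PySem.Set Int) (x : Int),
    (x ∈ ea.foldl (fun s a => eb.foldl (fun s y => PySem.Set.add s (a - y)) s) s)
      ↔ x ∈ s ∨ ∃ a ∈ ea, ∃ b ∈ eb, x = a - b := by
  induction ea with
  | nil => intro s x; simp
  | cons a0 rest ih =>
      intro s x
      simp only [List.foldl_cons]
      rw [ih, pvMem_foldl_add]
      constructor
      · rintro (⟨hs | ⟨y, hy, hx⟩⟩ | ⟨a, ha, b, hb, hx⟩)
        · exact Or.inl hs
        · exact Or.inr ⟨a0, List.mem_cons_self .., y, hy, hx⟩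
        · exact Or.inr ⟨a, List.mem_cons_of_mem _ ha, b, hb, hx⟩
      · rintro (hs | ⟨a, ha, b, hb, hx⟩)
        · exact Or.inl (Or.inl hs)
        · rcases List.mem_cons.mp ha with h | h
          · exact Or.inl (Or.inr ⟨b, hb, h ▸ hx⟩)
          · exact Or.inr ⟨a, h, b, hb, hx⟩

theorem pvMem_cands (ea eb : List Int) (x : Int) :
    (x ∈ ea.foldl (fun s a => eb.foldl (fun s y => PySem.Set.add s (a - y)) s) PySem.Set.empty)
      ↔ ∃ a ∈ ea, ∃ b ∈ eb, x = a - b := by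
  rw [pvMem_cands_gen]
  simp [PySem.Set.empty]

-- assembling the two sides
theorem pvAltFold (l : List Int) (g : Int → Int) (hg : ∀ d : Int, 0 ≤ g d) :
    (match l.map g with
      | [] => 0
      | v :: vs => vs.foldl max v)
    = l.foldl (fun b d => max b (g d)) 0 := by
  conv_rhs => rw [← List.foldl_map]
  cases hd : l.map g with
  | nil => rfl
  | cons v vs =>
      have hv : 0 ≤ v := by
        have : v ∈ l.map g := by rw [hd]; exact List.mem_cons_self ..
        rcases List.mem_map.mp this with ⟨y, _, hy⟩
        exact hy ▸ hg y
      simp only [List.foldl_cons]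
      rw [max_eq_right hv]

theorem pvDiffs_mem (ea eb : List Int) (x : Int) :
    x ∈ ea.flatMap (fun a => eb.map (fun y => a - y)) ↔ ∃ a ∈ ea, ∃ b ∈ eb, x = a - b := by
  simp only [List.mem_flatMap, List.mem_map]
  constructor
  · rintro ⟨a, ha, b, hb, hx⟩; exact ⟨a, ha, b, hb, hx.symm⟩
  · rintro ⟨a, ha, b, hb, hx⟩; exact ⟨a, ha, b, hb, hx.symm⟩

theorem pv_main (seq_a seq_b : List ((String × String) × Int)) :
    max_aligned_match_length seq_a seq_b = max_aligned_match_length_alt seq_a seq_b := by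
  unfold max_aligned_match_length max_aligned_match_length_alt
  simp only [pvBuildIntervalsA_eq, pvEndsB_eq, pvIntervalsB_eq, pvSweepA_top, pvStk_eq_ref]
  rw [pvAltFold _ _ (fun d => pvRefSweep_mono d _ _ 0)]
  by_cases hempty : pvIvs0 0 seq_a = [] ∨ pvIvs0 0 seq_b = []
  · rw [if_pos hempty]
    have hg0 : ∀ d : Int, pvRefSweep d (pvIvs0 0 seq_a) (pvIvs0 0 seq_b) 0 = 0 := by
      intro d
      rcases hempty with he | he <;> rw [he]
      · rw [pvRefSweep_nil_left]
      · rw [pvRefSweep_nil_right]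
    rcases pvFoldMax_cases (fun d => pvRefSweep d (pvIvs0 0 seq_a) (pvIvs0 0 seq_b) 0)
        (PySem.Set.ofList (List.flatMap (fun x => (pvEnds0 0 seq_b).map (fun y => x - y)) (pvEnds0 0 seq_a))) 0 with h | ⟨d, _, h⟩
    · exact h.symm
    · rw [h]
      exact (hg0 d).symm
  · rw [if_neg hempty, pvFoldIf_eq_foldMax]
    apply pvFoldMax_mem_congr
    intro x
    rw [PySem.List.mem_sorted, pvMem_cands, PySem.Set.mem_ofList, pvDiffs_mem]

-- ===== VERDICT (by name: the statement is the Claim_ definition above) =====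
theorem max_aligned_match_length_spec : Claim_equal_max_aligned_match_length := by
  intro seq_a seq_b _
  exact pv_main seq_a seq_b
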